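-- pv_equiv track=rewrite | github.com/dvalp/advent_of_code | 2020/src/day16_solution.py | validate_tickets
-- ===== SOURCE A (Python) =====
-- def validate_tickets(other_tickets: list[tuple[int]], valid_numbers: set[int]) -> tuple[int, list[tuple[int]]]:
--     """
--     The part one solution consists of the sum of all values that would be
--     invalid for any possible field.
--
--     Part 2 requires only the valid tickets, those filters for those, as well.
--
--     :param other_tickets: All tickets that were scanned
--     :param valid_numbers: All values that would valid for a field
--     :return: The total of the invalid numbers, and the valid tickets.
--     """
--     total_invalid = 0
--     valid_tickets = []
--     for ticket in other_tickets:
--         if invalid := (set(ticket) - valid_numbers):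
--             total_invalid += sum(invalid)
--         else:
--             valid_tickets.append(ticket)
--
--     return total_invalid, valid_tickets
-- ===== SOURCE B (Python) =====
-- def validate_tickets(other_tickets: list[tuple[int]], valid_numbers: set[int]) -> tuple[int, list[tuple[int]]]:
--     """Two independent passes: filter the fully-valid tickets, then sum each
--     ticket's set of invalid values (a valid ticket contributes 0)."""
--     valid_tickets = [t for t in other_tickets if set(t) <= valid_numbers]
--     total_invalid = sum(sum(set(t) - valid_numbers) for t in other_tickets)
--     return total_invalid, valid_tickets
-- ===== Notes on version B (the rewrite author's own statement) =====
-- stated objective: idiomatic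
-- what changed: Replaces the single accumulator loop (running total + appended list) with two declarative passes: a filter comprehension selecting the subset-valid tickets and a generator-sum of each ticket's invalid set (valid tickets contribute 0).
import Mathlib
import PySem

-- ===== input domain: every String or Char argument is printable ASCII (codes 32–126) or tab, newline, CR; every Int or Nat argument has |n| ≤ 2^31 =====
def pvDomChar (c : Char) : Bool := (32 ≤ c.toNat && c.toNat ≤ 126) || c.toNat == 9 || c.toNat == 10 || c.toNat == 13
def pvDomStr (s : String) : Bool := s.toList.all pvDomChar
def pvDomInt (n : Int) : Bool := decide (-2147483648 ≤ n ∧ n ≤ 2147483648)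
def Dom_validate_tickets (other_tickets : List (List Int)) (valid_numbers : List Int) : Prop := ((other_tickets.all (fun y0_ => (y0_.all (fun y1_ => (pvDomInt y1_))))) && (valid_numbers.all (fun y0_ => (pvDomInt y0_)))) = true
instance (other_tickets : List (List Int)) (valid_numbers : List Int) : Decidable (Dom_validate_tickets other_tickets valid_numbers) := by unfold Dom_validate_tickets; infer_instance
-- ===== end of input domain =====

-- B replaces A's single accumulator loop with two independent passes (filter + sum); idiomatic, same cost.
-- ===== PORT A =====
def validate_tickets (other_tickets : List (List Int)) (valid_numbers : List Int) : Int × List (List Int) :=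
  let r := other_tickets.foldl (fun (acc : Int × List (List Int)) ticket =>
    let invalid := PySem.Set.diff (PySem.Set.ofList ticket) valid_numbers
    if invalid ≠ [] then (acc.1 + invalid.sum, acc.2)
    else (acc.1, acc.2 ++ [ticket])) (0, [])
  (r.1, r.2)

-- ===== PORT B =====
def validate_tickets_alt (other_tickets : List (List Int)) (valid_numbers : List Int) : Int × List (List Int) :=
  let valid_tickets := other_tickets.filter
    (fun t => PySem.Set.issubset (PySem.Set.ofList t) valid_numbers)
  let total_invalid :=
    (other_tickets.map (fun t => (PySem.Set.diff (PySem.Set.ofList t) valid_numbers).sum)).sum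
  (total_invalid, valid_tickets)

-- ===== PRECONDITION & SPEC =====
def Spec_validate_tickets (other_tickets : List (List Int)) (valid_numbers : List Int) (out : Int × List (List Int)) : Prop := out = validate_tickets_alt other_tickets valid_numbers
instance (other_tickets : List (List Int)) (valid_numbers : List Int) (out : Int × List (List Int)) : Decidable (Spec_validate_tickets other_tickets valid_numbers out) := by unfold Spec_validate_tickets; infer_instance

-- ===== CLAIM (what is proved, stated in full; the proofs are below) =====
def Claim_equal_validate_tickets : Prop := ∀ (other_tickets : List (List Int)) (valid_numbers : List Int), Dom_validate_tickets other_tickets valid_numbers → Spec_validate_tickets other_tickets valid_numbers (validate_tickets other_tickets valid_numbers)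

-- ===== LEMMAS AND PROOFS =====

-- ===== VERDICT (by name: the statement is the Claim_ definition above) =====
-- diff(set(t), vn) is empty exactly when set(t) ⊆ vn
lemma diff_nil_iff_issubset (t vn : List Int) :
    PySem.Set.diff (PySem.Set.ofList t) vn = [] ↔
      PySem.Set.issubset (PySem.Set.ofList t) vn = true := by
  rw [PySem.Set.issubset_iff]
  simp [PySem.Set.diff, List.filter_eq_nil_iff]

lemma foldl_step (ot : List (List Int)) (vn : List Int) (a : Int) (v : List (List Int)) :
    ot.foldl (fun (acc : Int × List (List Int)) ticket =>
        let invalid := PySem.Set.diff (PySem.Set.ofList ticket) vn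
        if invalid ≠ [] then (acc.1 + invalid.sum, acc.2)
        else (acc.1, acc.2 ++ [ticket])) (a, v)
      = (a + (ot.map (fun t => (PySem.Set.diff (PySem.Set.ofList t) vn).sum)).sum,
         v ++ ot.filter (fun t => PySem.Set.issubset (PySem.Set.ofList t) vn)) := by
  induction ot generalizing a v with
  | nil => simp
  | cons t rest ih =>
    rw [List.foldl_cons]
    by_cases h : PySem.Set.diff (PySem.Set.ofList t) vn = []
    · have hs : PySem.Set.issubset (PySem.Set.ofList t) vn = true :=
        (diff_nil_iff_issubset t vn).mp h
      simp only [h, ne_eq, not_true_eq_false, ite_false, List.sum_nil]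
      rw [ih]
      simp [hs, h, List.filter_cons]
    · have hs : ¬ PySem.Set.issubset (PySem.Set.ofList t) vn = true := by
        intro hc; exact h ((diff_nil_iff_issubset t vn).mpr hc)
      simp only [ne_eq, h, not_false_eq_true, ite_true]
      rw [ih]
      simp [hs, add_assoc]

theorem validate_tickets_spec : Claim_equal_validate_tickets := by
  intro ot vn _
  show validate_tickets ot vn = validate_tickets_alt ot vn
  simp only [validate_tickets, validate_tickets_alt, foldl_step]
  simp
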